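-- pv_equiv track=rewrite | github.com/nik-panekin/freelance_assistant_bot | fl_parser.py | get_recent_jobs
-- ===== SOURCE A (Python) =====
-- def get_recent_jobs(jobs: list, last_job_url: str) -> list:
--     """Входные параметры:
--     jobs: list - исходный список проектов; структура данного списка повторяет
--     возвращаемый результат функции get_jobs_fl_ru();
--     last_job_url - адрес web-страницы проекта, после которого (включая и его)
--     другие проекты из начального списка добавляться в выходной список не будут.
--     остальные параметры те же, что и у get_jobs_fl_ru().
--
--     Возвращаемый результат:
--     список проектов, более новых, чем проект с адресом last_job_url; структура
--     списка та же, что и возвращаемая get_jobs_fl_ru(). "Прикреплённые" проекты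
--     игнорируются.
--     """
--     recent_jobs = []
--     for job in jobs:
--         if job.get('pinned', False):
--             continue
--         if job['url'] == last_job_url:
--             break
--         recent_jobs.append(job)
--     return recent_jobs
-- ===== SOURCE B (Python) =====
-- def get_recent_jobs(jobs: list, last_job_url: str) -> list:
--     # Stage 1: locate the sentinel -- the index of the first non-pinned job
--     # whose url equals last_job_url (len(jobs) if there is none).
--     stop = next((i for i, job in enumerate(jobs)
--                  if not job.get('pinned', False) and job['url'] == last_job_url),
--                 len(jobs))
--     # Stage 2: slice up to that index and drop pinned jobs.
--     return [job for job in jobs[:stop] if not job.get('pinned', False)]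
-- ===== Notes on version B (the rewrite author's own statement) =====
-- stated objective: alternative
-- what changed: Replaces A's fused loop (skip/break/append into an accumulator) by index arithmetic: first compute the cut index of the sentinel job with an enumerate search, then slice the list to that index and filter pinned jobs out of the slice.
import Mathlib
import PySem

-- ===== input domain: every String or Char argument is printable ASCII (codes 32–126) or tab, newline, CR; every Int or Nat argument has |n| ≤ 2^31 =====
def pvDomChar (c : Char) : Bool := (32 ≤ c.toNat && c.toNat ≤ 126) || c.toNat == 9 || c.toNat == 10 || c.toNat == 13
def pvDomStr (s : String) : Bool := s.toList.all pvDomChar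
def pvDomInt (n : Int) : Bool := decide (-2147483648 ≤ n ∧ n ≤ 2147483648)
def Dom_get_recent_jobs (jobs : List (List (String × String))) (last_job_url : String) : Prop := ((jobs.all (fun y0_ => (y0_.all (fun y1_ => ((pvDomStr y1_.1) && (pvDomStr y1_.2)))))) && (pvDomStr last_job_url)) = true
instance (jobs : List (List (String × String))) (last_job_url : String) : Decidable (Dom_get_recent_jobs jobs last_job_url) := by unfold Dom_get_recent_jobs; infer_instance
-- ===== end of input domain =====

-- B replaces A's fused loop (skip / break / append) by index arithmetic:
-- it first computes the cut index of the sentinel job, then slices and filters.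


-- shared accessors for the Python dict operations both programs use
-- job.get('pinned', False) used as a truth value: a string value is truthy iff non-empty
def pvPinned (job : List (String × String)) : Bool :=
  match PySem.Dict.get? (PySem.Dict.mk job) "pinned" with
  | some s => !(s == "")
  | none => false
-- job['url'] (raises KeyError when missing — excluded by Pre_; the port reads "" there)
def pvUrl (job : List (String × String)) : String := (PySem.Dict.get? (PySem.Dict.mk job) "url").getD ""
def pvHasUrl (job : List (String × String)) : Bool := (PySem.Dict.get? (PySem.Dict.mk job) "url").isSome

-- ===== PORT A =====
-- the for-loop with continue/break/append, as structural recursion over the same state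
def pvALoop (last_job_url : String) : List (List (String × String)) → List (List (String × String)) → List (List (String × String))
  | [], recent_jobs => recent_jobs
  | job :: rest, recent_jobs =>
    if pvPinned job then pvALoop last_job_url rest recent_jobs
    else if pvUrl job == last_job_url then recent_jobs
    else pvALoop last_job_url rest (recent_jobs ++ [job])

def get_recent_jobs (jobs : List (List (String × String))) (last_job_url : String) : List (List (String × String)) :=
  pvALoop last_job_url jobs []

-- ===== PORT B =====
-- Stage 1 of Source B: the enumerate search for the cut index (len(jobs) if no sentinel);
-- like the Python generator it tests 'pinned' first and reads 'url' only on non-pinned jobs.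
def pvStop (last_job_url : String) : List (List (String × String)) → Nat
  | [] => 0
  | job :: rest =>
    if !pvPinned job && (pvUrl job == last_job_url) then 0
    else 1 + pvStop last_job_url rest

-- Stage 2: jobs[:stop] (nonnegative in-range slice = List.take, exact here) then filter pinned out
def get_recent_jobs_alt (jobs : List (List (String × String))) (last_job_url : String) : List (List (String × String)) :=
  (jobs.take (pvStop last_job_url jobs)).filter (fun job => !pvPinned job)

-- ===== PRECONDITION & SPEC =====
-- Pre_ excludes exactly the inputs where A raises KeyError: a non-pinned job without
-- a 'url' key that the scan reaches before any non-pinned job whose url matches.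
def Pre_get_recent_jobs (jobs : List (List (String × String))) (last_job_url : String) : Prop :=
  ∀ i < jobs.length, (¬ pvPinned (jobs.getD i []) = true ∧ ¬ pvHasUrl (jobs.getD i []) = true) →
    ∃ k < i, ¬ pvPinned (jobs.getD k []) = true ∧ pvUrl (jobs.getD k []) = last_job_url
instance (jobs : List (List (String × String))) (last_job_url : String) : Decidable (Pre_get_recent_jobs jobs last_job_url) := by unfold Pre_get_recent_jobs; infer_instance
def pvWitness_get_recent_jobs : (List (List (String × String))) × String :=
  ([[("url", "a")], [("url", "b"), ("pinned", "y")], [("url", "c")]], "c")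
def Spec_get_recent_jobs (jobs : List (List (String × String))) (last_job_url : String) (out : List (List (String × String))) : Prop := out = get_recent_jobs_alt jobs last_job_url
instance (jobs : List (List (String × String))) (last_job_url : String) (out : List (List (String × String))) : Decidable (Spec_get_recent_jobs jobs last_job_url out) := by unfold Spec_get_recent_jobs; infer_instance

-- ===== CLAIM (what is proved, stated in full; the proofs are below) =====
def Claim_equal_get_recent_jobs : Prop := ∀ (jobs : List (List (String × String))) (last_job_url : String), Dom_get_recent_jobs jobs last_job_url → Pre_get_recent_jobs jobs last_job_url → Spec_get_recent_jobs jobs last_job_url (get_recent_jobs jobs last_job_url)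

-- ===== LEMMAS AND PROOFS =====
theorem pvALoop_eq (last : String) (jobs acc : List (List (String × String))) :
    pvALoop last jobs acc =
      acc ++ (jobs.take (pvStop last jobs)).filter (fun job => !pvPinned job) := by
  induction jobs generalizing acc with
  | nil => simp [pvALoop, pvStop]
  | cons job rest ih =>
    by_cases hp : pvPinned job
    · simp [pvALoop, pvStop, hp, ih, Nat.add_comm]
    · by_cases hu : pvUrl job == last
      · simp [pvALoop, pvStop, hp, hu]
      · simp [pvALoop, pvStop, hp, hu, ih, Nat.add_comm]

-- ===== VERDICT (by name: the statement is the Claim_ definition above) =====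
theorem get_recent_jobs_spec : Claim_equal_get_recent_jobs := by
  intro jobs last _ _
  unfold Spec_get_recent_jobs get_recent_jobs get_recent_jobs_alt
  simpa using pvALoop_eq last jobs []
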